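-- pv_equiv track=rewrite | github.com/Fuad-I/FooBar | test.py | solution
-- ===== SOURCE A (Python) =====
-- from collections import Counter
--
-- def get_gcd_table(n):
--     table = [[0 for _ in range(n + 1)] for _ in range(n + 1)]
--     for i in range(1, n + 1):
--         for j in range(i, n + 1):
--             if i == 1 or j == 1:
--                 table[i][j] = 1
--                 table[j][i] = 1
--             elif i == j:
--                 table[i][j] = i
--             else:
--                 table[i][j] = table[i][j - i]
--                 table[j][i] = table[i][j - i]
--     return table
--
-- def gcd(x, y, gcd_table):
--     return gcd_table[x][y]
--
-- def get_factorial_table(n):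
--     lst = [1]
--     for i in range(1, n + 1):
--         lst.append(i * lst[-1])
--     return lst
--
-- def factorial(n, factorial_table):
--     return factorial_table[n]
--
-- def get_cycle_index(partition, n, factorial_table):
--     """ n!/(1^{i_1}i_1!2^{i_2}i_2!...n^{i_n}i_n!) """
--
--     cycle_index = factorial(n, factorial_table)
--     for x, y in Counter(partition).items():
--         cycle_index //= (x ** y) * factorial(y, factorial_table)
--     return cycle_index
--
-- def get_partitions(n):
--     a = [0 for _ in range(n + 1)]
--     k = 1
--     y = n - 1
--     partitions = list()
--     while k != 0:
--         x = a[k - 1] + 1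
--         k -= 1
--         while 2 * x <= y:
--             a[k] = x
--             y -= x
--             k += 1
--         m = k + 1
--         while x <= y:
--             a[k] = x
--             a[m] = y
--             partitions.append(a[:k + 2])
--             x += 1
--             y -= 1
--         a[k] = x + y
--         y = x + y - 1
--         partitions.append(a[:k + 1])
--
--     return partitions
--
-- def solution(w, h, s):
--     gcd_table, factorial_table = get_gcd_table(max(w, h)), get_factorial_table(max(w, h))
--
--     result = 0
--     for partition_w in get_partitions(w):
--         for partition_h in get_partitions(h):
--             cycle_index_product = get_cycle_index(partition_w, w, factorial_table) * get_cycle_index(partition_h, h,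
--                                                                                                      factorial_table)
--             result += cycle_index_product * (s ** sum([sum([gcd(i, j, gcd_table) for i in partition_w]) for j in
--                                                        partition_h]))
--
--     result //= (factorial(w, factorial_table) * factorial(h, factorial_table))
--
--     return str(result)
-- ===== SOURCE B (Python) =====
-- # Burnside/Polya count, re-implemented: recursive ascending-partition generator
-- # (instead of the iterative accel-asc stack machine), Euclid's gcd and a plain
-- # running factorial (instead of precomputed gcd/factorial tables), and a one-pass
-- # cycle-index denominator (instead of a Counter).
--
-- def _gcd(a, b):
--     while b:
--         a, b = b, a % b
--     return a
--
--
-- def _fact(n):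
--     r = 1
--     for i in range(2, n + 1):
--         r *= i
--     return r
--
--
-- def _parts(t, m):
--     """Ascending partitions of t with every part >= m, in lexicographic order."""
--     res = []
--     for x in range(m, t // 2 + 1):
--         for tail in _parts(t - x, x):
--             res.append([x] + tail)
--     res.append([t])
--     return res
--
--
-- def _cycle_index(n, p):
--     # n! / prod(x**c * c! over multiplicities c of x in p), computed in one pass:
--     # each occurrence of a value contributes value * (occurrences so far).
--     den = 1
--     for i, v in enumerate(p):
--         den *= v * p[:i + 1].count(v)
--     return _fact(n) // den
--
--
-- def solution(w, h, s):
--     result = 0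
--     for pw in _parts(w, 1):
--         cw = _cycle_index(w, pw)
--         for ph in _parts(h, 1):
--             e = sum(sum(_gcd(i, j) for i in pw) for j in ph)
--             result += cw * _cycle_index(h, ph) * s ** e
--     return str(result // (_fact(w) * _fact(h)))
-- ===== Notes on version B (the rewrite author's own statement) =====
-- stated objective: alternative
-- what changed: Replaces the iterative accel-asc stack machine for partition enumeration with a recursive ascending-partition generator, the precomputed gcd DP table with Euclid's algorithm, the factorial lookup table with a running product, and the Counter-based cycle-index denominator with a one-pass occurrence-count product.
import Mathlib
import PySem

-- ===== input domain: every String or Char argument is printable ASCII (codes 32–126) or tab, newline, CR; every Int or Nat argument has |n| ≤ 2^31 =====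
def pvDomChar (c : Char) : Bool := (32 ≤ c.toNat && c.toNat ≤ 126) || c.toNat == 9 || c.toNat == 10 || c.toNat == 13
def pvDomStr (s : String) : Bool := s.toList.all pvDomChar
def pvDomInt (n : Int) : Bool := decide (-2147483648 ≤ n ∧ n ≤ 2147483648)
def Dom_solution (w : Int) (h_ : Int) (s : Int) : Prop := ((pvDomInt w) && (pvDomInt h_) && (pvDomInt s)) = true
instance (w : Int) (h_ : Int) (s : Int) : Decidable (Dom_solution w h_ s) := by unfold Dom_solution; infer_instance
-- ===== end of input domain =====

-- Burnside/Polya grid-coloring count.  B replaces A's iterative accel-asc partition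
-- machine by a recursive ascending-partition generator, the gcd DP table by Euclid's
-- algorithm, the factorial table by a running product, and the Counter-based
-- cycle-index denominator by a one-pass occurrence-count product.

-- ===== PORT A =====
-- Source A mutates `table`/`a`/`lst` in place; every executed index is nonnegative and in
-- range when w,h ≥ 1 (Pre_), so writes are ported with PySem.List.pySetD and reads with
-- pyGetD (exact there); the unbounded while-loops get fuel that the proofs show suffices.
def pvGet2 (t : List (List Int)) (i j : Int) : Int :=
  PySem.List.pyGetD (PySem.List.pyGetD t i []) j 0

def pvSet2 (t : List (List Int)) (i j v : Int) : List (List Int) :=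
  PySem.List.pySetD t i (PySem.List.pySetD (PySem.List.pyGetD t i []) j v)

def getGcdTable (n : Int) : List (List Int) :=
  let table := (PySem.List.pyRange 0 (n+1) 1).map
    (fun _ => (PySem.List.pyRange 0 (n+1) 1).map (fun _ => (0:Int)))
  (PySem.List.pyRange 1 (n+1) 1).foldl (fun table i =>
    (PySem.List.pyRange i (n+1) 1).foldl (fun table j =>
      if i == 1 || j == 1 then
        pvSet2 (pvSet2 table i j 1) j i 1
      else if i == j then
        pvSet2 table i j i
      else
        let t1 := pvSet2 table i j (pvGet2 table i (j - i))
        pvSet2 t1 j i (pvGet2 t1 i (j - i))) table) table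

def gcdA (x y : Int) (gcdTable : List (List Int)) : Int := pvGet2 gcdTable x y

def getFactorialTable (n : Int) : List Int :=
  (PySem.List.pyRange 1 (n+1) 1).foldl
    (fun lst i => lst ++ [i * PySem.List.pyGetD lst (-1) 0]) [1]

def factorialA (n : Int) (factorialTable : List Int) : Int :=
  PySem.List.pyGetD factorialTable n 0

def getCycleIndex (partition : List Int) (n : Int) (factorialTable : List Int) : Int :=
  (PySem.Dict.counter partition).items.foldl
    (fun ci (xy : Int × Int) =>
      PySem.Int.floordiv ci ((xy.1 ^ xy.2.toNat) * factorialA xy.2 factorialTable))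
    (factorialA n factorialTable)

def loop1A : Nat → Int → Int → Int → List Int → (Int × Int × List Int)
  | 0, _, y, k, a => (y, k, a)
  | f+1, x, y, k, a =>
    if 2*x ≤ y then loop1A f x (y - x) (k + 1) (PySem.List.pySetD a k x)
    else (y, k, a)

def loop2A : Nat → Int → Int → Int → Int → List Int → List (List Int) →
    (Int × Int × List Int × List (List Int))
  | 0, x, y, _, _, a, ps => (x, y, a, ps)
  | f+1, x, y, k, m, a, ps =>
    if x ≤ y then
      let a' := PySem.List.pySetD (PySem.List.pySetD a k x) m y
      loop2A f (x+1) (y-1) k m a' (ps ++ [PySem.List.slice a' none (some (k+2))])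
    else (x, y, a, ps)

def outerA : Nat → Int → Int → List Int → List (List Int) → List (List Int)
  | 0, _, _, _, ps => ps
  | f+1, k, y, a, ps =>
    if k == 0 then ps
    else
      let x := PySem.List.pyGetD a (k-1) 0 + 1
      let k1 := k - 1
      let r1 := loop1A (y.toNat + 1) x y k1 a
      let y1 := r1.1; let k2 := r1.2.1; let a1 := r1.2.2
      let m := k2 + 1
      let r2 := loop2A (y1.toNat + 1) x y1 k2 m a1 ps
      let x2 := r2.1; let y2 := r2.2.1; let a2 := r2.2.2.1; let ps2 := r2.2.2.2
      let a3 := PySem.List.pySetD a2 k2 (x2 + y2)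
      let ps3 := ps2 ++ [PySem.List.slice a3 none (some (k2+1))]
      outerA f k2 (x2 + y2 - 1) a3 ps3

def getPartitionsA (n : Int) : List (List Int) :=
  let a := (PySem.List.pyRange 0 (n+1) 1).map (fun _ => (0:Int))
  outerA (2 ^ n.toNat) 1 (n - 1) a []

def solution (w : Int) (h_ : Int) (s : Int) : String :=
  let gcdTable := getGcdTable (max w h_)
  let factorialTable := getFactorialTable (max w h_)
  let result := (getPartitionsA w).foldl (fun result pw =>
    (getPartitionsA h_).foldl (fun result ph =>
      let cip := getCycleIndex pw w factorialTable * getCycleIndex ph h_ factorialTable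
      result + cip * s ^ ((ph.map (fun j =>
        (pw.map (fun i => gcdA i j gcdTable)).sum)).sum).toNat) result) 0
  let result := PySem.Int.floordiv result
    (factorialA w factorialTable * factorialA h_ factorialTable)
  PySem.Int.toStr result

-- ===== PORT B =====
def gcdBAux : Nat → Int → Int → Int
  | 0, a, _ => a
  | f+1, a, b => if b == 0 then a else gcdBAux f b (PySem.Int.mod a b)

def gcdB (a b : Int) : Int := gcdBAux (b.toNat + 1) a b

def factB (n : Int) : Int :=
  (PySem.List.pyRange 2 (n+1) 1).foldl (fun r i => r * i) 1

def partsB : Nat → Int → Int → List (List Int)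
  | 0, t, _ => [[t]]
  | f+1, t, m =>
    (PySem.List.pyRange m (PySem.Int.floordiv t 2 + 1) 1).foldl (fun res x =>
      res ++ (partsB f (t - x) x).map (fun tail => x :: tail)) [] ++ [[t]]

def cycleIndexB (n : Int) (p : List Int) : Int :=
  let den := (PySem.List.enumerate p).foldl (fun den iv =>
    den * (iv.2 * ((PySem.List.slice p none (some (iv.1 + 1))).count iv.2 : Int))) 1
  PySem.Int.floordiv (factB n) den

def solution_alt (w : Int) (h_ : Int) (s : Int) : String :=
  let result := (partsB w.toNat w 1).foldl (fun result pw =>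
    let cw := cycleIndexB w pw
    (partsB h_.toNat h_ 1).foldl (fun result ph =>
      let e := (ph.map (fun j => (pw.map (fun i => gcdB i j)).sum)).sum
      result + cw * cycleIndexB h_ ph * s ^ e.toNat) result) 0
  PySem.Int.toStr (PySem.Int.floordiv result (factB w * factB h_))

-- ===== PRECONDITION & SPEC =====
-- A raises on w ≤ 0 (IndexError in get_partitions) and on h ≤ 0 (IndexError or
-- ZeroDivisionError in get_cycle_index); Pre_ excludes exactly those inputs.
def Pre_solution (w : Int) (h_ : Int) (s : Int) : Prop := 1 ≤ w ∧ 1 ≤ h_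
instance (w : Int) (h_ : Int) (s : Int) : Decidable (Pre_solution w h_ s) := by
  unfold Pre_solution; infer_instance

def pvWitness_solution : Int × Int × Int := (2, 2, 2)

def Spec_solution (w : Int) (h_ : Int) (s : Int) (out : String) : Prop := out = solution_alt w h_ s
instance (w : Int) (h_ : Int) (s : Int) (out : String) : Decidable (Spec_solution w h_ s out) := by unfold Spec_solution; infer_instance

-- ===== CLAIM (what is proved, stated in full; the proofs are below) =====
def Claim_equal_solution : Prop := ∀ (w : Int) (h_ : Int) (s : Int), Dom_solution w h_ s → Pre_solution w h_ s → Spec_solution w h_ s (solution w h_ s)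

-- ===== LEMMAS AND PROOFS =====

-- ---------- generic list helpers ----------
lemma take_set_of_le (l : List Int) (n m : Nat) (v : Int) (h : m ≤ n) :
    (l.set n v).take m = l.take m := by
  rw [List.take_set]
  exact List.set_eq_of_length_le (by simp; omega)

lemma take_succ_set (l : List Int) (n : Nat) (v : Int) (h : n < l.length) :
    (l.set n v).take (n+1) = l.take n ++ [v] := by
  rw [List.take_succ_eq_append_getElem (by simp [h]), take_set_of_le l n n v le_rfl]
  simp [h]

lemma getD_take (l : List Int) (i j : Nat) (d : Int) (h : i < j) :
    (l.take j).getD i d = l.getD i d := by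
  simp [List.getD, List.getElem?_take, h]

lemma length_le_sum (l : List Int) (h : ∀ v ∈ l, 1 ≤ v) : (l.length : Int) ≤ l.sum := by
  induction l with
  | nil => simp
  | cons x xs ih =>
    simp only [List.length_cons, List.sum_cons]
    have := h x (by simp)
    have := ih (fun v hv => h v (by simp [hv]))
    push_cast; omega

lemma sum_take_succ (l : List Int) (K : Nat) (h : K < l.length) :
    (l.take (K+1)).sum = (l.take K).sum + l.getD K 0 := by
  rw [List.take_succ_eq_append_getElem h, List.sum_append]
  simp [List.getD, List.getElem?_eq_getElem h]

-- ---------- the recursive ascending-partition spec ----------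
def specParts (t : Nat) (m : Int) : List (List Int) :=
  ((PySem.List.pyRange (max m 1) ((t:Int)/2 + 1) 1).attach.flatMap
    (fun x => (specParts (t - x.1.toNat) x.1).map (fun tail => x.1 :: tail))) ++ [[(t:Int)]]
termination_by t
decreasing_by
  have hx := PySem.List.mem_pyRange_one.mp x.2
  omega

lemma specParts_def (t : Nat) (m : Int) :
    specParts t m = ((PySem.List.pyRange (max m 1) ((t:Int)/2 + 1) 1).flatMap
      (fun x => (specParts (t - x.toNat) x).map (fun tail => x :: tail))) ++ [[(t:Int)]] := by
  rw [specParts]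
  congr 1
  conv_rhs => rw [← List.attach_map_subtype_val (PySem.List.pyRange (max m 1) ((t:Int)/2 + 1) 1)]
  rw [List.flatMap_map]

lemma specParts_base (t : Nat) (m : Int) (h : (t:Int) < 2 * max m 1) :
    specParts t m = [[(t:Int)]] := by
  rw [specParts_def, PySem.List.pyRange_one_eq_nil (by omega)]
  simp

lemma specParts_step (t : Nat) (m : Int) (h1 : 1 ≤ m) (h2 : 2*m ≤ (t:Int)) :
    specParts t m
      = (specParts (t - m.toNat) m).map (fun tail => m :: tail) ++ specParts t (m+1) := by
  rw [specParts_def, specParts_def t (m+1)]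
  have hmax : max m 1 = m := by omega
  have hmax1 : max (m+1) 1 = m+1 := by omega
  rw [hmax, hmax1, PySem.List.pyRange_one_cons (by omega)]
  simp [List.flatMap_cons, List.append_assoc]

lemma specParts_ne_nil (t : Nat) (m : Int) : specParts t m ≠ [] := by
  rw [specParts_def]; simp

-- every member of specParts t m (1 ≤ m ≤ t) is a nonempty list of parts ≥ m summing to t
lemma specParts_mem (t : Nat) (m : Int) (h1 : 1 ≤ m) (h2 : m ≤ (t:Int)) :
    ∀ l ∈ specParts t m, l ≠ [] ∧ (∀ v ∈ l, m ≤ v) ∧ l.sum = (t:Int) := by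
  induction t using Nat.strong_induction_on generalizing m with
  | _ t IH =>
    intro l hl
    rw [specParts_def] at hl
    rcases List.mem_append.mp hl with hl | hl
    · obtain ⟨x, hx, hlx⟩ := List.mem_flatMap.mp hl
      obtain ⟨hx1, hx2⟩ := PySem.List.mem_pyRange_one.mp hx
      obtain ⟨tail, htail, rfl⟩ := List.mem_map.mp hlx
      have hxt : t - x.toNat < t := by omega
      have := IH _ hxt x (by omega) (by omega) tail htail
      refine ⟨by simp, ?_, ?_⟩
      · intro v hv
        rcases List.mem_cons.mp hv with rfl | hv
        · omega
        · have := this.2.1 v hv; omega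
      · have := this.2.2
        simp only [List.sum_cons, this]
        omega
    · simp only [List.mem_singleton] at hl
      subst hl
      refine ⟨by simp, ?_, by simp⟩
      intro v hv; simp at hv; omega

-- |specParts t m| ≤ 2^t
lemma specParts_len (t : Nat) (m : Int) : (specParts t m).length ≤ 2^t := by
  induction t using Nat.strong_induction_on generalizing m with
  | _ t IH =>
    have inner : ∀ (c : Nat) (aL : Int), 1 ≤ aL → aL + c ≤ (t:Int)/2 + 1 →
        ((PySem.List.pyRange aL (aL + c) 1).flatMap
          (fun x => (specParts (t - x.toNat) x).map (fun tail => x :: tail))).length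
          ≤ 2^(t + 1 - aL.toNat) - 1 := by
      intro c
      induction c with
      | zero => intro aL _ _; rw [PySem.List.pyRange_one_eq_nil (by omega)]; simp
      | succ c ih =>
        intro aL haL hbound
        rw [PySem.List.pyRange_one_cons (by omega), List.flatMap_cons, List.length_append]
        have h1 : (specParts (t - aL.toNat) aL).length ≤ 2^(t - aL.toNat) :=
          IH _ (by omega) aL
        have h2 := ih (aL + 1) (by omega) (by omega)
        have hrange : (aL : Int) + 1 + (c:Int) = aL + (c+1:Nat) := by push_cast; ring
        rw [hrange] at h2
        simp only [List.length_map]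
        have hpow : 2^(t - aL.toNat) + (2^(t + 1 - (aL+1).toNat) - 1) ≤ 2^(t + 1 - aL.toNat) - 1 := by
          have e1 : (aL + 1).toNat = aL.toNat + 1 := by omega
          rw [e1]
          have haLt : aL.toNat ≤ t := by omega
          have e2 : t + 1 - aL.toNat = (t - aL.toNat) + 1 := by omega
          have e3 : t + 1 - (aL.toNat + 1) = t - aL.toNat := by omega
          rw [e2, e3, pow_succ]
          have : 1 ≤ 2^(t - aL.toNat) := Nat.one_le_two_pow
          omega
        omega
    rcases le_or_gt ((t:Int)/2 + 1) (max m 1) with hc | hc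
    · rw [specParts_def, PySem.List.pyRange_one_eq_nil hc]
      simpa using Nat.one_le_two_pow
    · have hfin := inner ((((t:Int)/2 + 1) - max m 1).toNat) (max m 1) (by omega) (by omega)
      rw [specParts_def]
      have heq : max m 1 + ((((t:Int)/2 + 1) - max m 1).toNat : Int) = (t:Int)/2 + 1 := by omega
      rw [heq] at hfin
      rw [List.length_append]
      have h1 : 2^(t + 1 - (max m 1).toNat) ≤ 2^t :=
        Nat.pow_le_pow_right (by omega) (by omega)
      have h2 : 1 ≤ 2^(t + 1 - (max m 1).toNat) := Nat.one_le_two_pow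
      simp only [List.length_singleton]
      omega

-- ---------- B's partition generator computes specParts ----------
lemma partsB_eq_spec : ∀ (f : Nat) (t m : Int), 1 ≤ m → 1 ≤ t → t.toNat ≤ f →
    partsB f t m = specParts t.toNat m := by
  intro f
  induction f with
  | zero => intro t m h1 h2 h3; omega
  | succ f ih =>
    intro t m h1 h2 h3
    rw [partsB, PySem.List.foldl_append_eq_flatMap, List.nil_append, specParts_def]
    have hmax : max m 1 = m := by omega
    have hcast : ((t.toNat : Int)) = t := by omega
    have hdiv : PySem.Int.floordiv t 2 = (t:Int)/2 := PySem.Int.floordiv_eq_ediv_of_pos (by omega)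
    rw [hmax, hcast, hdiv]
    congr 1
    apply List.flatMap_congr
    intro x hx
    obtain ⟨hx1, hx2⟩ := PySem.List.mem_pyRange_one.mp hx
    have h4 : 1 ≤ t - x := by omega
    have h5 : (t - x).toNat ≤ f := by omega
    rw [ih (t - x) x (by omega) h4 h5]
    have : (t - x).toNat = t.toNat - x.toNat := by omega
    rw [this]

-- ---------- loop1 ----------
lemma loop1A_spec : ∀ (yn : Nat) (x y k : Int) (a : List Int),
    1 ≤ x → 0 ≤ y → y.toNat ≤ yn → 0 ≤ k → k.toNat + y.toNat ≤ a.length →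
    ∃ (c : Nat),
      loop1A (yn+1) x y k a
        = (y - c*x, k + c, a.take k.toNat ++ List.replicate c x ++ a.drop (k.toNat + c)) ∧
      0 ≤ y - c*x ∧ ¬(2*x ≤ y - c*x) ∧ (c = 0 ∨ x ≤ y - c*x) ∧
      (∀ j : Nat, j < c → 2*x ≤ y - j*x) := by
  intro yn
  induction yn using Nat.strong_induction_on with
  | _ yn IH =>
    intro x y k a hx hy hyn hk hlen
    rw [loop1A]
    by_cases hpush : 2*x ≤ y
    · rw [if_pos hpush]
      have hyn1 : 1 ≤ yn := by omega
      obtain ⟨yn', rfl⟩ : ∃ yn', yn = yn' + 1 := ⟨yn - 1, by omega⟩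
      have hset : PySem.List.pySetD a k x = a.set k.toNat x :=
        PySem.List.pySetD_of_nonneg a x hk
      rw [hset]
      have hklen : k.toNat < a.length := by omega
      obtain ⟨c', heq, h1, h2, h3, h4⟩ := IH yn' (by omega) x (y - x) (k + 1) (a.set k.toNat x)
        hx (by omega) (by omega) (by omega)
        (by rw [List.length_set]; omega)
      refine ⟨c' + 1, ?_, by push_cast at *; nlinarith [h1], ?_, ?_, ?_⟩
      · rw [heq]
        have e1 : y - x - c'*x = y - ((c'+1 : Nat) : Int)*x := by push_cast; ring
        have e2 : (k + 1) + (c' : Int) = k + ((c'+1 : Nat) : Int) := by push_cast; ring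
        have e3 : (k+1).toNat = k.toNat + 1 := by omega
        have e4 : (a.set k.toNat x).take (k.toNat + 1) = a.take k.toNat ++ [x] :=
          take_succ_set a k.toNat x hklen
        have e5 : (a.set k.toNat x).drop (k.toNat + 1 + c') = a.drop (k.toNat + (c' + 1)) := by
          rw [List.drop_set_of_lt (by omega)]; congr 1; omega
        rw [e1, e2, e3, e4, e5]
        simp [List.replicate_succ, List.append_assoc]
      · have := h2
        intro hcon
        apply this
        push_cast at hcon ⊢
        linarith [hcon]
      · right
        rcases h3 with rfl | h3
        · push_cast; linarith [hpush]
        · push_cast at h3 ⊢; linarith [h3]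
      · intro j hj
        rcases Nat.eq_zero_or_pos j with rfl | hjpos
        · simpa using hpush
        · have := h4 (j - 1) (by omega)
          have ej : ((j - 1 : Nat) : Int) = (j : Int) - 1 := by omega
          rw [ej] at this
          push_cast at this ⊢
          linarith [this]
    · rw [if_neg hpush]
      refine ⟨0, ?_, by simpa using hy, by simpa using hpush, Or.inl rfl, by omega⟩
      simp

-- ---------- loop2 (+ the final append of each outer iteration) ----------
lemma loop2A_spec : ∀ (yn : Nat) (x y k : Int) (a : List Int) (ps : List (List Int)),
    1 ≤ x → 0 ≤ y → y.toNat ≤ yn → y < 2*x → 0 ≤ k → k.toNat + 1 < a.length →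
    ∃ (E : List (List Int)) (x2 y2 : Int) (a2 : List Int),
      loop2A (yn+1) x y k (k+1) a ps = (x2, y2, a2, ps ++ E) ∧
      x2 + y2 = x + y ∧
      a2.length = a.length ∧ a2.take k.toNat = a.take k.toNat ∧
      E ++ [a.take k.toNat ++ [x + y]]
        = (specParts (x+y).toNat x).map (fun q => a.take k.toNat ++ q) := by
  intro yn
  induction yn using Nat.strong_induction_on with
  | _ yn IH =>
    intro x y k a ps hx hy hyn hlt hk hlen
    rw [loop2A]
    by_cases hit : x ≤ y
    · rw [if_pos hit]
      have hyn1 : 1 ≤ yn := by omega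
      obtain ⟨yn', rfl⟩ : ∃ yn', yn = yn' + 1 := ⟨yn - 1, by omega⟩
      have e1 : PySem.List.pySetD a k x = a.set k.toNat x := PySem.List.pySetD_of_nonneg a x hk
      have e2 : PySem.List.pySetD (a.set k.toNat x) (k+1) y
          = (a.set k.toNat x).set (k.toNat + 1) y := by
        rw [PySem.List.pySetD_of_nonneg _ y (by omega)]; congr 1; omega
      have hkl : k.toNat + 1 < a.length := hlen
      have eslice : PySem.List.slice ((a.set k.toNat x).set (k.toNat + 1) y) none (some (k+2))
          = a.take k.toNat ++ [x, y] := by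
        rw [PySem.List.slice_to _ (by omega)]
        have : (k+2).toNat = (k.toNat + 1) + 1 := by omega
        rw [this, take_succ_set _ _ _ (by rw [List.length_set]; omega),
            take_succ_set _ _ _ (by omega)]
        simp
      simp only [e1, e2, eslice]
      obtain ⟨E', x2, y2, a2, heq, hsum, hlen2, htake2, hE'⟩ :=
        IH yn' (by omega) (x+1) (y-1) k ((a.set k.toNat x).set (k.toNat + 1) y)
          (ps ++ [a.take k.toNat ++ [x, y]])
          (by omega) (by omega) (by omega) (by omega) hk
          (by simp only [List.length_set]; omega)
      have hterm : (x+1) + (y-1) = x + y := by ring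
      rw [hterm] at hsum hE'
      have htk : ((a.set k.toNat x).set (k.toNat + 1) y).take k.toNat = a.take k.toNat := by
        rw [take_set_of_le _ _ _ _ (by omega), take_set_of_le _ _ _ _ (by omega)]
      rw [htk] at htake2 hE'
      refine ⟨(a.take k.toNat ++ [x, y]) :: E', x2, y2, a2, ?_, hsum, by simpa using hlen2, htake2, ?_⟩
      · rw [heq]
        simp [List.append_assoc]
      · have hstep := specParts_step (x+y).toNat x hx (by omega)
        have hsub : (x+y).toNat - x.toNat = y.toNat := by omega
        have hbase : specParts y.toNat x = [[(y.toNat : Int)]] :=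
          specParts_base y.toNat x (by omega)
        rw [hsub, hbase] at hstep
        rw [hstep]
        have hyc : ((y.toNat : Int)) = y := by omega
        simp only [List.map_append, List.map_map, List.map_cons, List.map_nil, hyc]
        rw [← hE']
        simp
    · rw [if_neg hit]
      refine ⟨[], x, y, a, by simp, rfl, rfl, rfl, ?_⟩
      have hbase : specParts (x+y).toNat x = [[((x+y).toNat : Int)]] :=
        specParts_base (x+y).toNat x (by omega)
      rw [hbase]
      have : (((x+y).toNat : Int)) = x + y := by omega
      simp [this]

-- ---------- the pending partitions encoded by the machine's stack ----------
def chainPending (x y : Int) (P : List Int) : Nat → List (List Int)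
  | 0 => []
  | i+1 => (specParts (x + (y - (i:Int)*x)).toNat (x+1)).map
      (fun q => (P ++ List.replicate i x) ++ q) ++ chainPending x y P i

lemma spec_chain : ∀ (c : Nat) (x y : Int) (P : List Int),
    1 ≤ x → (∀ j : Nat, j < c → 2*x ≤ y - j*x) →
    (specParts (x+y).toNat x).map (fun q => P ++ q)
      = (specParts (x + (y - c*x)).toNat x).map (fun q => (P ++ List.replicate c x) ++ q)
        ++ chainPending x y P c := by
  intro c
  induction c with
  | zero => intro x y P hx _; simp [chainPending]
  | succ c ih =>
    intro x y P hx hcond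
    rw [ih x y P hx (fun j hj => hcond j (by omega))]
    have hc : 2*x ≤ y - c*x := hcond c (by omega)
    have ht : ((((x + (y - c*x)).toNat) : Int)) = x + (y - c*x) := by omega
    have hstep := specParts_step (x + (y - c*x)).toNat x hx (by omega)
    have hsub : (x + (y - c*x)).toNat - x.toNat = (x + (y - ((c:Int)+1)*x)).toNat := by
      have e : x + (y - ((c:Int)+1)*x) = y - (c:Int)*x := by ring
      rw [e]; omega
    rw [hsub] at hstep
    rw [hstep, List.map_append, List.map_map]
    rw [chainPending]
    have hcast : ((c+1 : Nat) : Int) = (c:Int) + 1 := by push_cast; ring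
    rw [hcast, List.append_assoc]
    congr 1
    apply List.map_congr_left
    intro q _
    simp [List.replicate_succ', List.append_assoc]

def pendingFrom (n : Int) (a : List Int) : Nat → List (List Int)
  | 0 => []
  | j+1 => (specParts (n - (a.take j).sum).toNat (a.getD j 0 + 1)).map
      (fun q => a.take j ++ q) ++ pendingFrom n a j

lemma pendingFrom_congr : ∀ (j : Nat) (n : Int) (a a' : List Int),
    a.take j = a'.take j → pendingFrom n a j = pendingFrom n a' j := by
  intro j
  induction j with
  | zero => intro n a a' _; rfl
  | succ j ih =>
    intro n a a' h
    have htj : a.take j = a'.take j := by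
      have := congrArg (List.take j) h
      simpa [List.take_take] using this
    have hgd : a.getD j 0 = a'.getD j 0 := by
      rw [← getD_take a j (j+1) 0 (by omega), ← getD_take a' j (j+1) 0 (by omega), h]
    rw [pendingFrom, pendingFrom, ih n a a' htj, htj, hgd]

lemma pendingFrom_ne_nil (n : Int) (a : List Int) (j : Nat) :
    pendingFrom n a (j+1) ≠ [] := by
  rw [pendingFrom]
  simp only [ne_eq, List.append_eq_nil_iff, List.map_eq_nil_iff, not_and]
  intro hcon
  exact absurd hcon (specParts_ne_nil _ _)

-- frames pushed by loop1 decode to chainPending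
lemma pendingFrom_rep : ∀ (c : Nat) (n x y : Int) (a : List Int) (K : Nat),
    a.take (K + c) = a.take K ++ List.replicate c x →
    n - (a.take K).sum = x + y →
    K + c ≤ a.length →
    pendingFrom n a (K + c) = chainPending x y (a.take K) c ++ pendingFrom n a K := by
  intro c
  induction c with
  | zero => intro n x y a K _ _ _; simp [chainPending]
  | succ c ih =>
    intro n x y a K h hsum hlen
    have hKlen : K ≤ a.length := by omega
    have hPlen : (a.take K).length = K := by simp [List.length_take]; omega
    have htc : a.take (K + c) = a.take K ++ List.replicate c x := by
      have := congrArg (List.take (K + c)) h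
      rw [List.take_take] at this
      have e1 : min (K + c) (K + (c+1)) = K + c := by omega
      rw [e1] at this
      rw [this, List.take_append, hPlen]
      have e2 : K + c - K = c := by omega
      rw [e2, List.take_replicate]
      have e3 : min c (c+1) = c := by omega
      rw [e3, List.take_of_length_le (by omega)]
    have hgd : a.getD (K + c) 0 = x := by
      rw [← getD_take a (K+c) (K+c+1) 0 (by omega)]
      have e0 : K + c + 1 = K + (c+1) := by omega
      rw [e0, h, List.getD_append_right _ _ _ _ (by omega), hPlen]
      have e1 : K + c - K = c := by omega
      rw [e1, List.getD_replicate _ (by omega)]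
    have hsumc : (a.take (K+c)).sum = (a.take K).sum + c * x := by
      rw [htc, List.sum_append, List.sum_replicate]
      simp [nsmul_eq_mul]
    rw [show K + (c + 1) = (K + c) + 1 from rfl, pendingFrom, hsumc, hgd, htc,
        ih n x y a K htc hsum (by omega), chainPending]
    have e4 : n - ((a.take K).sum + c * x) = x + (y - (c:Int)*x) := by omega
    rw [e4, List.append_assoc]

-- ---------- the outer loop ----------
def MachInv (n k y : Int) (a : List Int) : Prop :=
  0 ≤ k ∧ 1 ≤ n ∧ a.length = n.toNat + 1 ∧ k.toNat < a.length ∧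
  y = n - (a.take k.toNat).sum - 1 ∧ 0 ≤ y ∧
  (∀ i : Nat, i + 1 < k.toNat → 1 ≤ a.getD i 0) ∧
  (1 ≤ k.toNat → 0 ≤ a.getD (k.toNat - 1) 0)

lemma sum_take_ge (a : List Int) (j : Nat) (hj : j ≤ a.length)
    (h : ∀ i : Nat, i < j → 1 ≤ a.getD i 0) : (j:Int) ≤ (a.take j).sum := by
  induction j with
  | zero => simp
  | succ j ih =>
    rw [sum_take_succ a j (by omega)]
    have h1 := ih (by omega) (fun i hi => h i (by omega))
    have h2 := h j (by omega)
    push_cast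
    omega

lemma outerA_spec : ∀ (f : Nat) (k y : Int) (a : List Int) (ps : List (List Int)) (n : Int),
    MachInv n k y a → (pendingFrom n a k.toNat).length ≤ f →
    outerA f k y a ps = ps ++ pendingFrom n a k.toNat := by
  intro f
  induction f with
  | zero =>
    intro k y a ps n hInv hlen
    rcases Nat.eq_zero_or_pos k.toNat with h0 | hpos
    · rw [h0]; simp [outerA, pendingFrom]
    · exfalso
      obtain ⟨j, hj⟩ : ∃ j, k.toNat = j + 1 := ⟨k.toNat - 1, by omega⟩
      rw [hj] at hlen
      have := pendingFrom_ne_nil n a j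
      have hL := List.length_pos_of_ne_nil this
      omega
  | succ f ih =>
    intro k y a ps n hInv hlen
    obtain ⟨hk, hn, hlenA, hKlen, hy, hy0, hparts, hlast⟩ := hInv
    by_cases hk0 : k = 0
    · subst hk0
      rw [outerA]
      simp [pendingFrom]
    · -- K ≥ 1
      have hK1 : 1 ≤ k.toNat := by omega
      have hbeq : (k == 0) = false := by simp; omega
      -- the value x = a[k-1] + 1
      have hpg : PySem.List.pyGetD a (k-1) 0 = a.getD (k.toNat - 1) 0 := by
        have e : k - 1 = ((k.toNat - 1 : Nat) : Int) := by omega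
        rw [e, PySem.List.pyGetD_natCast]
      set K := k.toNat with hKdef
      set x := a.getD (K - 1) 0 + 1 with hxdef
      have hx1 : 1 ≤ x := by have := hlast hK1; omega
      -- prefix P and totals
      set P := a.take (K-1) with hPdef
      have hPlen : P.length = K - 1 := by rw [hPdef]; simp [List.length_take]; omega
      have eK : K - 1 + 1 = K := by omega
      have hsumsucc : (a.take K).sum = P.sum + a.getD (K-1) 0 := by
        have h := sum_take_succ a (K-1) (by omega)
        rw [eK] at h
        rw [hPdef]
        exact h
      have hPsum_ge : ((K:Int)) - 1 ≤ P.sum := by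
        have := sum_take_ge a (K-1) (by omega) (fun i hi => hparts i (by omega))
        rw [← hPdef] at this; push_cast at this; omega
      have hT : x + y = n - P.sum := by omega
      have hlenInt : (a.length : Int) = n + 1 := by omega
      have hKn : (K:Int) - 1 + y ≤ n - 1 := by
        have h0 := hlast hK1
        omega
      -- loop1
      obtain ⟨c, hL1, hc0, hc1, hc2, hc3⟩ :=
        loop1A_spec y.toNat x y (k-1) a hx1 hy0 le_rfl (by omega)
          (by have : (k-1).toNat = K - 1 := by omega
              omega)
      have hkm1 : (k-1).toNat = K - 1 := by omega
      rw [hkm1] at hL1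
      have hcle : (c:Int) = 0 ∨ (c:Int) + 1 ≤ y := by
        rcases hc2 with h | h
        · left; simp [h]
        · right
          have hcx : (c:Int) ≤ c*x := le_mul_of_one_le_right (Int.natCast_nonneg c) hx1
          omega
      have hKc : K - 1 + c ≤ n.toNat - 1 := by
        rcases hcle with h | h
        · have : c = 0 := by omega
          omega
        · omega
      set a1 := a.take (K-1) ++ List.replicate c x ++ a.drop (K - 1 + c) with ha1def
      have hlen1 : a1.length = a.length := by
        rw [ha1def]
        simp [List.length_append, List.length_take, List.length_drop]
        omega
      have htake1a : a1.take (K-1) = P := by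
        rw [ha1def, hPdef, List.append_assoc, List.take_append, List.length_take]
        have e : min (K-1) a.length = K - 1 := by omega
        rw [e]
        simp [List.take_take]
      have htake1b : a1.take (K-1+c) = P ++ List.replicate c x := by
        rw [ha1def, List.append_assoc, List.take_append, List.length_take]
        have e : min (K-1) a.length = K - 1 := by omega
        rw [e]
        have e2 : K - 1 + c - (K-1) = c := by omega
        rw [e2, List.take_append, List.length_replicate, List.take_replicate]
        have e3 : min c c = c := by omega
        have e4 : c - c = 0 := by omega
        rw [e3, e4]
        simp [hPdef, List.take_take, min_comm]
      -- loop2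
      set y1 := y - c*x with hy1def
      have hsumQ : (P ++ List.replicate c x).sum = P.sum + c*x := by
        rw [List.sum_append, List.sum_replicate]
        simp [nsmul_eq_mul]
      obtain ⟨E, x2, y2, a2, hL2, hsum2, hlen2, htake2, hE⟩ :=
        loop2A_spec y1.toNat x y1 ((k-1) + c) a1 ps hx1 hc0 le_rfl (by omega)
          (by omega)
          (by rw [hlen1]
              have : ((k-1) + (c:Int)).toNat = K - 1 + c := by omega
              omega)
      have hk2nat : ((k-1) + (c:Int)).toNat = K - 1 + c := by omega
      rw [hk2nat] at htake2 hE
      rw [htake1b] at htake2 hE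
      -- now compute the outer body
      rw [outerA, hbeq]
      simp only [Bool.false_eq_true, if_false, hpg]
      rw [hL1, hL2]
      have hset3 : PySem.List.pySetD a2 (k - 1 + (c:Int)) (x2 + y2)
          = a2.set (K - 1 + c) (x2 + y2) := by
        rw [PySem.List.pySetD_of_nonneg _ _ (by omega), hk2nat]
      rw [hset3]
      have hK1len2 : K - 1 + c < a2.length := by rw [hlen2, hlen1]; omega
      have hslice3 : PySem.List.slice (a2.set (K - 1 + c) (x2 + y2)) none
            (some ((k - 1 + (c:Int)) + 1))
          = (P ++ List.replicate c x) ++ [x + y1] := by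
        rw [PySem.List.slice_to _ (by omega)]
        have e : ((k - 1 + (c:Int)) + 1).toNat = (K - 1 + c) + 1 := by omega
        rw [e, take_succ_set _ _ _ hK1len2, htake2, hsum2]
      rw [hslice3]
      -- the new state
      set a3 := a2.set (K - 1 + c) (x2 + y2) with ha3def
      have htake3 : a3.take (K - 1 + c) = P ++ List.replicate c x := by
        rw [ha3def, take_set_of_le _ _ _ _ le_rfl, htake2]
      have htake3P : a3.take (K - 1) = P := by
        have := congrArg (List.take (K-1)) htake3
        rw [List.take_take] at this
        have e : min (K-1) (K-1+c) = K - 1 := by omega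
        rw [e] at this
        rw [this, List.take_append, hPlen]
        have e2 : K - 1 - (K-1) = 0 := by omega
        rw [e2]
        simp [hPdef, List.take_take]
      have hlen3 : a3.length = a.length := by rw [ha3def, List.length_set, hlen2, hlen1]
      have hsum3 : (a3.take (K-1+c)).sum = P.sum + c*x := by rw [htake3, hsumQ]
      -- MachInv for the recursive call
      have hInv' : MachInv n (k - 1 + (c:Int)) (x2 + y2 - 1) a3 := by
        refine ⟨by omega, hn, by omega, by omega, ?_, by omega, ?_, ?_⟩
        · rw [hk2nat, hsum3]; omega
        · intro i hi
          rw [hk2nat] at hi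
          have hgd : a3.getD i 0 = (a3.take (K-1+c)).getD i 0 := by
            rw [getD_take _ _ _ _ (by omega)]
          rw [hgd, htake3]
          rcases Nat.lt_or_ge i (K-1) with hiK | hiK
          · rw [List.getD_append _ _ _ _ (by omega)]
            have := hparts i (by omega)
            rw [hPdef, getD_take _ _ _ _ (by omega)]
            exact this
          · rw [List.getD_append_right _ _ _ _ (by omega), hPlen,
                List.getD_replicate _ (by omega)]
            exact hx1
        · intro h1
          rw [hk2nat] at h1 ⊢
          have hgd : a3.getD (K-1+c-1) 0 = (a3.take (K-1+c)).getD (K-1+c-1) 0 := by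
            rw [getD_take _ _ _ _ (by omega)]
          rw [hgd, htake3]
          rcases Nat.eq_zero_or_pos c with rfl | hcpos
          · simp only [Nat.add_zero] at h1 ⊢
            rw [List.getD_append _ _ _ _ (by omega)]
            have := hparts (K-1-1) (by omega)
            rw [hPdef, getD_take _ _ _ _ (by omega)]
            omega
          · rw [List.getD_append_right _ _ _ _ (by omega), hPlen,
                List.getD_replicate _ (by omega)]
            omega
      -- decompose the pending lists
      have hframe : pendingFrom n a K
          = (specParts (x+y).toNat x).map (fun q => P ++ q) ++ pendingFrom n a (K-1) := by
        have e : K = (K-1) + 1 := by omega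
        rw [e, pendingFrom, ← hPdef]
        have e2 : n - P.sum = x + y := by omega
        have e3 : a.getD (K-1) 0 + 1 = x := rfl
        rw [e2, e3]
        have e4 : K - 1 + 1 - 1 = K - 1 := by omega
        simp only [e4]
      have hchain := spec_chain c x y P hx1 hc3
      have hrep : pendingFrom n a3 (K-1+c)
          = chainPending x y P c ++ pendingFrom n a3 (K-1) := by
        have := pendingFrom_rep c n x y a3 (K-1)
          (by rw [htake3, htake3P]) (by rw [htake3P]; omega) (by omega)
        rw [htake3P] at this
        exact this
      have hcongr : pendingFrom n a3 (K-1) = pendingFrom n a (K-1) :=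
        pendingFrom_congr (K-1) n a3 a (by rw [htake3P, hPdef])
      -- fuel for the recursive call
      have hlen' : (pendingFrom n a3 (K-1+c)).length ≤ f := by
        have hEq : pendingFrom n a K
            = E ++ [(P ++ List.replicate c x) ++ [x + y1]] ++ pendingFrom n a3 (K-1+c) := by
          rw [hframe, hchain, ← hE, hrep, hcongr]
          simp [List.append_assoc]
        rw [hEq] at hlen
        simp only [List.length_append, List.length_cons] at hlen ⊢
        omega
      have hihres := ih (k - 1 + (c:Int)) (x2 + y2 - 1) a3
        (ps ++ E ++ [(P ++ List.replicate c x) ++ [x + y1]]) n hInv'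
        (by rw [hk2nat]; exact hlen')
      rw [hk2nat] at hihres
      rw [hihres, hframe, hchain, ← hE, hrep, hcongr]
      simp [List.append_assoc]

lemma getPartitionsA_eq_spec (n : Int) (h : 1 ≤ n) :
    getPartitionsA n = specParts n.toNat 1 := by
  rw [getPartitionsA]
  have ha0 : (PySem.List.pyRange 0 (n+1) 1).map (fun _ => (0:Int))
      = List.replicate (n.toNat + 1) (0:Int) := by
    rw [List.map_const', PySem.List.length_pyRange_one]
    congr 1; omega
  rw [ha0]
  set a0 := List.replicate (n.toNat + 1) (0:Int) with ha0def
  have hlen0 : a0.length = n.toNat + 1 := by simp [ha0def]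
  have htk1 : a0.take 1 = [0] := by
    rw [ha0def, List.take_replicate]
    have e : min 1 (n.toNat + 1) = 1 := by omega
    rw [e, List.replicate_one]
  have hgd0 : a0.getD 0 0 = 0 := by
    rw [← getD_take a0 0 1 0 (by omega), htk1]; rfl
  have hpend : pendingFrom n a0 1 = specParts n.toNat 1 := by
    rw [show (1:Nat) = 0 + 1 from rfl, pendingFrom, pendingFrom]
    simp only [List.take_zero, List.sum_nil, List.nil_append, List.append_nil, hgd0]
    have e : (n - 0 : Int) = n := by omega
    rw [e]
    norm_num [List.map_id']
  have hInv : MachInv n 1 (n - 1) a0 := by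
    refine ⟨by omega, h, hlen0, by omega, ?_, by omega, by omega, ?_⟩
    · rw [show (1:Int).toNat = 1 from rfl, htk1]; simp
    · intro _; rw [show (1:Int).toNat = 1 from rfl, hgd0]
  have := outerA_spec (2 ^ n.toNat) 1 (n-1) a0 [] n hInv
    (by rw [show (1:Int).toNat = 1 from rfl, hpend]; exact specParts_len n.toNat 1)
  rw [show (1:Int).toNat = 1 from rfl, hpend] at this
  simpa using this

-- ---------- factorial tables ----------
lemma getFactorialTable_eq (N : Int) (h : 0 ≤ N) :
    getFactorialTable N = (List.range (N.toNat + 1)).map (fun i => (Nat.factorial i : Int)) := by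
  have key : ∀ c : Nat, (PySem.List.pyRange 1 (1 + (c:Int)) 1).foldl
      (fun lst i => lst ++ [i * PySem.List.pyGetD lst (-1) 0]) [1]
      = (List.range (c + 1)).map (fun i => (Nat.factorial i : Int)) := by
    intro c
    induction c with
    | zero => rw [PySem.List.pyRange_one_eq_nil (by omega)]; simp [Nat.factorial]
    | succ c ih =>
      have e : (1 : Int) + ((c+1 : Nat) : Int) = (1 + (c:Int)) + 1 := by push_cast; ring
      rw [e, PySem.List.pyRange_one_succ_right (by omega), List.foldl_append, ih]
      simp only [List.foldl_cons, List.foldl_nil]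
      conv_rhs => rw [List.range_succ, List.map_append]
      congr 1
      have eg : PySem.List.pyGetD ((List.range (c+1)).map (fun i => (Nat.factorial i : Int))) (-1) 0
          = (Nat.factorial c : Int) := by
        rw [List.range_succ, List.map_append]
        simp only [List.map_cons, List.map_nil]
        rw [PySem.List.pyGetD_neg_one_append_singleton]
      rw [eg]
      simp only [List.map_cons, List.map_nil]
      congr 1
      rw [Nat.factorial_succ]
      push_cast; ring
  rw [getFactorialTable]
  have e : N + 1 = 1 + (N.toNat : Int) := by omega
  rw [e, key N.toNat]

lemma factorialA_eq (N : Int) (hN : 0 ≤ N) (i : Int) (h0 : 0 ≤ i) (h1 : i ≤ N) :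
    factorialA i (getFactorialTable N) = (Nat.factorial i.toNat : Int) := by
  rw [factorialA, getFactorialTable_eq N hN]
  have e : i = ((i.toNat : Nat) : Int) := by omega
  rw [e, PySem.List.pyGetD_natCast]
  rw [List.getD, List.getElem?_map, List.getElem?_range (by omega)]
  rfl

lemma factB_eq (n : Int) (h : 0 ≤ n) : factB n = (Nat.factorial n.toNat : Int) := by
  have key : ∀ c : Nat, (PySem.List.pyRange 2 (2 + (c:Int)) 1).foldl (fun r i => r * i) 1
      = (Nat.factorial (c + 1) : Int) := by
    intro c
    induction c with
    | zero => rw [PySem.List.pyRange_one_eq_nil (by omega)]; simp [Nat.factorial]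
    | succ c ih =>
      have e : (2 : Int) + ((c+1 : Nat) : Int) = (2 + (c:Int)) + 1 := by push_cast; ring
      rw [e, PySem.List.pyRange_one_succ_right (by omega), List.foldl_append, ih]
      simp only [List.foldl_cons, List.foldl_nil]
      conv_rhs => rw [show c + 1 + 1 = (c+1)+1 from rfl, Nat.factorial_succ]
      push_cast; ring
  rw [factB]
  rcases eq_or_lt_of_le h with heq | hpos
  · rw [← heq]
    rw [PySem.List.pyRange_one_eq_nil (by omega)]
    simp [Nat.factorial]
  · have e : n + 1 = 2 + ((n.toNat - 1 : Nat) : Int) := by omega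
    rw [e, key (n.toNat - 1)]
    have e2 : n.toNat - 1 + 1 = n.toNat := by omega
    rw [e2]

-- ---------- the gcd table ----------
def TblShape (N : Int) (t : List (List Int)) : Prop :=
  t.length = N.toNat + 1 ∧ ∀ r ∈ t, r.length = N.toNat + 1

-- Nat-indexed view of the 2-d table
def GN (t : List (List Int)) (p q : Nat) : Int := (t.getD p []).getD q 0

lemma getD_set_ne' {α : Type} (l : List α) (n i : Nat) (v d : α) (h : i ≠ n) :
    (l.set n v).getD i d = l.getD i d := by
  simp [List.getD, List.getElem?_set_ne (fun a => h (id (Eq.symm a)))]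

lemma getD_set_self' {α : Type} (l : List α) (n : Nat) (v d : α) (h : n < l.length) :
    (l.set n v).getD n d = v := by
  simp [List.getD, List.getElem?_set_self h]

lemma pvGet2_eq (t : List (List Int)) (i j : Int) (hi : 0 ≤ i) (hj : 0 ≤ j) :
    pvGet2 t i j = GN t i.toNat j.toNat := by
  rw [pvGet2, GN, show i = ((i.toNat : Nat) : Int) from by omega,
      show j = ((j.toNat : Nat) : Int) from by omega,
      PySem.List.pyGetD_natCast, PySem.List.pyGetD_natCast]
  simp
  have e1 : (max i 0).toNat = i.toNat := by omega
  have e2 : (max j 0).toNat = j.toNat := by omega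
  rw [e1, e2]

lemma pvSet2_eq (t : List (List Int)) (i j v : Int) (hi : 0 ≤ i) (hj : 0 ≤ j) :
    pvSet2 t i j v = t.set i.toNat ((t.getD i.toNat []).set j.toNat v) := by
  rw [pvSet2, PySem.List.pySetD_of_nonneg _ _ hi, PySem.List.pySetD_of_nonneg _ _ hj,
      show i = ((i.toNat : Nat) : Int) from by omega, PySem.List.pyGetD_natCast]
  simp
  have e1 : (max i 0).toNat = i.toNat := by omega
  rw [e1]

lemma GN_set_self (t : List (List Int)) (p q : Nat) (v : Int)
    (hp : p < t.length) (hq : q < (t.getD p []).length) :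
    GN (t.set p ((t.getD p []).set q v)) p q = v := by
  rw [GN, getD_set_self' _ _ _ _ hp, getD_set_self' _ _ _ _ hq]

lemma GN_set_ne (t : List (List Int)) (p q p' q' : Nat) (v : Int)
    (h : p' ≠ p ∨ q' ≠ q) :
    GN (t.set p ((t.getD p []).set q v)) p' q' = GN t p' q' := by
  rcases h with h | h
  · rw [GN, getD_set_ne' _ _ _ _ _ h, GN]
  · rw [GN, GN]
    by_cases hp : p' = p
    · subst hp
      by_cases hlt : p' < t.length
      · rw [getD_set_self' _ _ _ _ hlt, getD_set_ne' _ _ _ _ _ h]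
      · rw [List.set_eq_of_length_le (by omega)]
    · rw [getD_set_ne' _ _ _ _ _ hp]

lemma shape_row (N : Int) (t : List (List Int)) (h : TblShape N t) (p : Nat)
    (hp : p < t.length) : (t.getD p []).length = N.toNat + 1 := by
  apply h.2
  rw [List.getD, List.getElem?_eq_getElem hp]
  exact List.getElem_mem hp

lemma shape_S (N : Int) (t : List (List Int)) (p q : Nat) (v : Int)
    (h : TblShape N t) (hp : p < t.length) :
    TblShape N (t.set p ((t.getD p []).set q v)) := by
  refine ⟨by rw [List.length_set]; exact h.1, ?_⟩
  intro r hr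
  rcases List.mem_or_eq_of_mem_set hr with hr | rfl
  · exact h.2 r hr
  · rw [List.length_set]
    exact shape_row N t h p hp

def DoneU (N : Int) (t : List (List Int)) (i j : Int) : Prop :=
  ∀ p q : Int, 1 ≤ p → p ≤ N → 1 ≤ q → q ≤ N →
    (min p q < i ∨ (min p q = i ∧ max p q < j)) →
    GN t p.toNat q.toNat = (Int.gcd p q : Int)

-- one execution of the inner-loop body establishes the (i,j)/(j,i) entries
lemma gcd_body (N i j : Int) (t : List (List Int)) (hN : 1 ≤ N)
    (hi1 : 1 ≤ i) (hij : i ≤ j) (hjN : j ≤ N)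
    (hsh : TblShape N t) (hdone : DoneU N t i j) :
    TblShape N (if i == 1 || j == 1 then
        pvSet2 (pvSet2 t i j 1) j i 1
      else if i == j then
        pvSet2 t i j i
      else
        let t1 := pvSet2 t i j (pvGet2 t i (j - i))
        pvSet2 t1 j i (pvGet2 t1 i (j - i))) ∧
    DoneU N (if i == 1 || j == 1 then
        pvSet2 (pvSet2 t i j 1) j i 1
      else if i == j then
        pvSet2 t i j i
      else
        let t1 := pvSet2 t i j (pvGet2 t i (j - i))
        pvSet2 t1 j i (pvGet2 t1 i (j - i))) i (j+1) := by
  have hlen : t.length = N.toNat + 1 := hsh.1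
  have hiL : i.toNat < t.length := by omega
  have hjL : j.toNat < t.length := by omega
  -- a generic finisher: if t' has the right new entries, keeps old ones, and has shape
  have finish : ∀ t' : List (List Int), TblShape N t' →
      GN t' i.toNat j.toNat = (Int.gcd i j : Int) →
      GN t' j.toNat i.toNat = (Int.gcd i j : Int) →
      (∀ p q : Nat, (p ≠ i.toNat ∨ q ≠ j.toNat) → (p ≠ j.toNat ∨ q ≠ i.toNat) →
        GN t' p q = GN t p q) →
      TblShape N t' ∧ DoneU N t' i (j+1) := by
    intro t' hsh' hnew1 hnew2 hold
    refine ⟨hsh', ?_⟩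
    intro p q hp1 hpN hq1 hqN hcond
    by_cases hc1 : p = i ∧ q = j
    · obtain ⟨rfl, rfl⟩ := hc1; exact hnew1
    by_cases hc2 : p = j ∧ q = i
    · obtain ⟨rfl, rfl⟩ := hc2
      rw [hnew2, Int.gcd_comm]
    · -- an old pair
      rw [hold p.toNat q.toNat
          (by rcases not_and_or.mp hc1 with h | h
              · left; omega
              · right; omega)
          (by rcases not_and_or.mp hc2 with h | h
              · left; omega
              · right; omega)]
      apply hdone p q hp1 hpN hq1 hqN
      rcases hcond with h | ⟨h1, h2⟩
      · left; exact h
      · -- min = i, max < j+1; the pair is not {i,j}, so max < j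
        right
        refine ⟨h1, ?_⟩
        rcases le_total p q with hpq | hpq
        · have hmin : min p q = p := by omega
          have hmax : max p q = q := by omega
          rw [hmax]; rw [hmin] at h1; rw [hmax] at h2
          have : ¬(q = j) := fun hq => hc1 ⟨by omega, hq⟩
          omega
        · have hmin : min p q = q := by omega
          have hmax : max p q = p := by omega
          rw [hmax]; rw [hmin] at h1; rw [hmax] at h2
          have : ¬(p = j) := fun hp => hc2 ⟨hp, by omega⟩
          omega
  by_cases hb1 : i = 1 ∨ j = 1
  · have hbeq : (i == 1 || j == 1) = true := by
      rcases hb1 with h | h <;> simp [h]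
    rw [hbeq, if_pos rfl]
    have hgcd : (Int.gcd i j : Int) = 1 := by
      rcases hb1 with rfl | rfl
      · rw [Int.gcd_one_left]; rfl
      · rw [Int.gcd_one_right]; rfl
    rw [pvSet2_eq t i j 1 (by omega) (by omega)]
    set t1 := t.set i.toNat ((t.getD i.toNat []).set j.toNat 1) with ht1
    have hsh1 : TblShape N t1 := shape_S N t i.toNat j.toNat 1 hsh hiL
    rw [pvSet2_eq t1 j i 1 (by omega) (by omega)]
    have hsh2 : TblShape N _ := shape_S N t1 j.toNat i.toNat 1 hsh1 (by rw [ht1, List.length_set]; omega)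
    apply finish _ hsh2
    · by_cases hd : i = j
      · subst hd
        rw [GN_set_self _ _ _ _ (by rw [ht1, List.length_set]; omega)
            (by rw [shape_row N t1 hsh1 i.toNat (by rw [ht1, List.length_set]; omega)]; omega), hgcd]
      · rw [GN_set_ne _ _ _ _ _ _ (Or.inl (by omega)),
            GN_set_self _ _ _ _ hiL (by rw [shape_row N t hsh i.toNat hiL]; omega), hgcd]
    · rw [GN_set_self _ _ _ _ (by rw [ht1, List.length_set]; omega)
          (by rw [shape_row N t1 hsh1 j.toNat (by rw [ht1, List.length_set]; omega)]; omega), hgcd]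
    · intro p q hpq1 hpq2
      rw [GN_set_ne _ _ _ _ _ _ (by omega), GN_set_ne _ _ _ _ _ _ (by omega)]
  · have hbeq : (i == 1 || j == 1) = false := by
      simp only [Bool.or_eq_false_iff, beq_eq_false_iff_ne, ne_eq]
      omega
    rw [hbeq]
    simp only [Bool.false_eq_true, if_false]
    by_cases hd : i = j
    · subst hd
      have hbeq2 : (i == i) = true := by simp
      rw [hbeq2, if_pos rfl]
      rw [pvSet2_eq t i i i (by omega) (by omega)]
      have hsh1 := shape_S N t i.toNat i.toNat i hsh hiL
      apply finish _ hsh1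
      · rw [GN_set_self _ _ _ _ hiL (by rw [shape_row N t hsh i.toNat hiL]; omega)]
        rw [Int.gcd_self, Int.natAbs_of_nonneg (by omega)]
      · rw [GN_set_self _ _ _ _ hiL (by rw [shape_row N t hsh i.toNat hiL]; omega)]
        rw [Int.gcd_self, Int.natAbs_of_nonneg (by omega)]
      · intro p q hpq1 _
        rw [GN_set_ne _ _ _ _ _ _ (by omega)]
    · have hbeq2 : (i == j) = false := by simp; omega
      rw [hbeq2]
      simp only [Bool.false_eq_true, if_false]
      have hilt : i < j := by omega
      -- the looked-up value is gcd i (j-i) = gcd i j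
      have hread : pvGet2 t i (j - i) = (Int.gcd i j : Int) := by
        rw [pvGet2_eq t i (j-i) (by omega) (by omega)]
        have := hdone i (j - i) (by omega) (by omega) (by omega) (by omega)
          (by rcases le_or_gt i (j - i) with hle | hgt
              · right
                constructor
                · omega
                · have : max i (j - i) = j - i := by omega
                  omega
              · left; omega)
        rw [this, Int.gcd_sub_self_right]
      rw [hread]
      rw [pvSet2_eq t i j _ (by omega) (by omega)]
      set t1 := t.set i.toNat ((t.getD i.toNat []).set j.toNat (Int.gcd i j : Int)) with ht1
      have hsh1 : TblShape N t1 := shape_S N t i.toNat j.toNat _ hsh hiL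
      have ht1len : t1.length = N.toNat + 1 := by rw [ht1, List.length_set]; omega
      have hread2 : pvGet2 t1 i (j - i) = (Int.gcd i j : Int) := by
        rw [pvGet2_eq t1 i (j-i) (by omega) (by omega), ht1,
            GN_set_ne _ _ _ _ _ _ (Or.inr (by omega)), ← pvGet2_eq t i (j-i) (by omega) (by omega), hread]
      rw [hread2]
      rw [pvSet2_eq t1 j i _ (by omega) (by omega)]
      have hsh2 := shape_S N t1 j.toNat i.toNat (Int.gcd i j : Int) hsh1 (by omega)
      apply finish _ hsh2
      · rw [GN_set_ne _ _ _ _ _ _ (Or.inl (by omega)), ht1,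
            GN_set_self _ _ _ _ hiL (by rw [shape_row N t hsh i.toNat hiL]; omega)]
      · rw [GN_set_self _ _ _ _ (by omega)
            (by rw [shape_row N t1 hsh1 j.toNat (by omega)]; omega)]
      · intro p q hpq1 hpq2
        rw [GN_set_ne _ _ _ _ _ _ (by omega), ht1, GN_set_ne _ _ _ _ _ _ (by omega)]

lemma getGcdTable_eq (N : Int) (hN : 1 ≤ N) (i j : Int)
    (hi1 : 1 ≤ i) (hi2 : i ≤ N) (hj1 : 1 ≤ j) (hj2 : j ≤ N) :
    pvGet2 (getGcdTable N) i j = (Int.gcd i j : Int) := by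
  have inner : ∀ (c : Nat) (i0 j0 : Int) (t : List (List Int)), 1 ≤ i0 → i0 ≤ j0 →
      N + 1 - j0 = c → TblShape N t → DoneU N t i0 j0 →
      TblShape N ((PySem.List.pyRange j0 (N+1) 1).foldl (fun table j =>
        if i0 == 1 || j == 1 then
          pvSet2 (pvSet2 table i0 j 1) j i0 1
        else if i0 == j then
          pvSet2 table i0 j i0
        else
          let t1 := pvSet2 table i0 j (pvGet2 table i0 (j - i0))
          pvSet2 t1 j i0 (pvGet2 t1 i0 (j - i0))) t) ∧
      DoneU N ((PySem.List.pyRange j0 (N+1) 1).foldl (fun table j =>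
        if i0 == 1 || j == 1 then
          pvSet2 (pvSet2 table i0 j 1) j i0 1
        else if i0 == j then
          pvSet2 table i0 j i0
        else
          let t1 := pvSet2 table i0 j (pvGet2 table i0 (j - i0))
          pvSet2 t1 j i0 (pvGet2 t1 i0 (j - i0))) t) i0 (N+1) := by
    intro c
    induction c with
    | zero =>
      intro i0 j0 t h1 h2 h3 hsh hdone
      rw [PySem.List.pyRange_one_eq_nil (by omega)]
      constructor
      · exact hsh
      · simpa [show j0 = N + 1 from by omega] using hdone
    | succ c ih =>
      intro i0 j0 t h1 h2 h3 hsh hdone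
      rw [PySem.List.pyRange_one_cons (by omega), List.foldl_cons]
      obtain ⟨hsh', hdone'⟩ := gcd_body N i0 j0 t hN h1 h2 (by omega) hsh hdone
      exact ih i0 (j0 + 1) _ h1 (by omega) (by omega) hsh' hdone'
  have shift : ∀ (i0 : Int) (t : List (List Int)), i0 ≤ N → DoneU N t i0 (N+1) →
      DoneU N t (i0+1) (i0+1) := by
    intro i0 t hi0 hdone p q hp1 hpN hq1 hqN hcond
    apply hdone p q hp1 hpN hq1 hqN
    rcases hcond with h | ⟨h1, h2⟩
    · rcases lt_or_ge (min p q) i0 with h' | h'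
      · left; exact h'
      · right
        constructor
        · omega
        · omega
    · omega
  have outer : ∀ (c : Nat) (i0 : Int) (t : List (List Int)), 1 ≤ i0 →
      N + 1 - i0 = c → TblShape N t → DoneU N t i0 i0 →
      TblShape N ((PySem.List.pyRange i0 (N+1) 1).foldl (fun table i =>
        (PySem.List.pyRange i (N+1) 1).foldl (fun table j =>
          if i == 1 || j == 1 then
            pvSet2 (pvSet2 table i j 1) j i 1
          else if i == j then
            pvSet2 table i j i
          else
            let t1 := pvSet2 table i j (pvGet2 table i (j - i))
            pvSet2 t1 j i (pvGet2 t1 i (j - i))) table) t) ∧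
      DoneU N ((PySem.List.pyRange i0 (N+1) 1).foldl (fun table i =>
        (PySem.List.pyRange i (N+1) 1).foldl (fun table j =>
          if i == 1 || j == 1 then
            pvSet2 (pvSet2 table i j 1) j i 1
          else if i == j then
            pvSet2 table i j i
          else
            let t1 := pvSet2 table i j (pvGet2 table i (j - i))
            pvSet2 t1 j i (pvGet2 t1 i (j - i))) table) t) (N+1) (N+1) := by
    intro c
    induction c with
    | zero =>
      intro i0 t h1 h2 hsh hdone
      rw [PySem.List.pyRange_one_eq_nil (by omega)]
      constructor
      · exact hsh
      · simpa [show i0 = N + 1 from by omega] using hdone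
    | succ c ih =>
      intro i0 t h1 h2 hsh hdone
      rw [PySem.List.pyRange_one_cons (by omega), List.foldl_cons]
      obtain ⟨hsh', hdone'⟩ := inner ((N + 1 - i0).toNat) i0 i0 t h1 le_rfl (by omega) hsh hdone
      exact ih (i0 + 1) _ (by omega) (by omega) hsh' (shift i0 _ (by omega) hdone')
  -- the initial table
  have hinit : TblShape N ((PySem.List.pyRange 0 (N+1) 1).map
      (fun _ => (PySem.List.pyRange 0 (N+1) 1).map (fun _ => (0:Int)))) := by
    constructor
    · rw [List.length_map, PySem.List.length_pyRange_one]; omega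
    · intro r hr
      obtain ⟨_, _, rfl⟩ := List.mem_map.mp hr
      rw [List.length_map, PySem.List.length_pyRange_one]; omega
  have hdone0 : DoneU N ((PySem.List.pyRange 0 (N+1) 1).map
      (fun _ => (PySem.List.pyRange 0 (N+1) 1).map (fun _ => (0:Int)))) 1 1 := by
    intro p q hp1 hpN hq1 hqN hcond
    exfalso; omega
  obtain ⟨hshF, hdoneF⟩ := outer N.toNat 1 _ (by omega) (by omega) hinit hdone0
  rw [getGcdTable]
  rw [pvGet2_eq _ i j (by omega) (by omega)]
  exact hdoneF i j hi1 hi2 hj1 hj2 (by left; omega)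

-- ---------- Euclid's gcd ----------
lemma gcdBAux_eq : ∀ (fn : Nat) (a b : Int), 0 ≤ a → 0 ≤ b → b.toNat < fn →
    gcdBAux fn a b = (Int.gcd a b : Int) := by
  intro fn
  induction fn using Nat.strong_induction_on with
  | _ fn IH =>
    intro a b ha hb hfn
    obtain ⟨fn', rfl⟩ : ∃ fn', fn = fn' + 1 := ⟨fn - 1, by omega⟩
    rw [gcdBAux]
    by_cases hb0 : b = 0
    · subst hb0
      simp only [BEq.rfl, if_true]
      rw [Int.gcd_zero_right, Int.natAbs_of_nonneg ha]
    · have hbpos : 0 < b := by omega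
      have hbeq : (b == 0) = false := by simp; omega
      rw [hbeq]
      simp only [Bool.false_eq_true, if_false]
      rw [PySem.Int.mod_eq_emod_of_pos hbpos]
      have hmod0 : 0 ≤ a % b := Int.emod_nonneg a (by omega)
      have hmodlt : a % b < b := Int.emod_lt_of_pos a hbpos
      obtain ⟨fn'', rfl⟩ : ∃ m, fn' = m + 1 := ⟨fn' - 1, by omega⟩
      rw [IH (fn'' + 1) (by omega) b (a % b) hb hmod0 (by omega)]
      rw [Int.gcd_comm, Int.gcd_emod]

lemma gcdB_eq (a b : Int) (ha : 0 ≤ a) (hb : 0 ≤ b) : gcdB a b = (Int.gcd a b : Int) :=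
  gcdBAux_eq (b.toNat + 1) a b ha hb (by omega)

-- ---------- cycle index ----------
def cycDiv (p : List Int) (v : Int) : Int :=
  v ^ p.count v * (Nat.factorial (p.count v) : Int)

lemma foldl_floordiv (L : List Int) (A : Int) (hA : 0 ≤ A) (hL : ∀ d ∈ L, 1 ≤ d) :
    L.foldl (fun acc d => PySem.Int.floordiv acc d) A = PySem.Int.floordiv A L.prod := by
  induction L generalizing A with
  | nil =>
    simp only [List.foldl_nil, List.prod_nil]
    rw [PySem.Int.floordiv_eq_ediv_of_pos (by omega), Int.ediv_one]
  | cons d L' ih =>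
    rw [List.foldl_cons, List.prod_cons]
    have hd : 1 ≤ d := hL d (by simp)
    have hprod : 1 ≤ L'.prod := List.one_le_prod (fun x hx => hL x (by simp [hx]))
    have hAd : 0 ≤ PySem.Int.floordiv A d := by
      rw [PySem.Int.floordiv_eq_ediv_of_pos (by omega)]
      exact Int.ediv_nonneg hA (by omega)
    rw [ih _ hAd (fun x hx => hL x (by simp [hx]))]
    rw [PySem.Int.floordiv_eq_ediv_of_pos (by omega), PySem.Int.floordiv_eq_ediv_of_pos (by omega),
        PySem.Int.floordiv_eq_ediv_of_pos (by positivity)]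
    exact Int.ediv_ediv_eq_ediv_mul (by omega)

lemma prod_ofList_append (l : List Int) (v : Int) :
    ((PySem.Set.ofList (l ++ [v])).map (cycDiv (l ++ [v]))).prod
    = ((PySem.Set.ofList l).map (cycDiv l)).prod * (v * ((l.count v : Int) + 1)) := by
  have hofl : PySem.Set.ofList (l ++ [v]) = PySem.Set.add (PySem.Set.ofList l) v := by
    rw [PySem.Set.ofList_eq_foldl, PySem.Set.ofList_eq_foldl, List.foldl_append]
    rfl
  have hcv : (l ++ [v]).count v = l.count v + 1 := by simp
  have hcu : ∀ u : Int, u ≠ v → (l ++ [v]).count u = l.count u := by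
    intro u hu
    rw [List.count_append]
    have : List.count u [v] = 0 := by
      rw [List.count_eq_zero]
      simpa using hu
    omega
  have hstep : cycDiv (l ++ [v]) v = cycDiv l v * (v * ((l.count v : Int) + 1)) := by
    rw [cycDiv, cycDiv, hcv, pow_succ, Nat.factorial_succ]
    push_cast; ring
  by_cases hv : v ∈ PySem.Set.ofList l
  · have hadd : PySem.Set.add (PySem.Set.ofList l) v = PySem.Set.ofList l := by
      unfold PySem.Set.add
      rw [if_pos ((PySem.Set.contains_iff _ _).mpr hv)]
    rw [hofl, hadd]
    have hnd : (PySem.Set.ofList l).Nodup := PySem.Set.nodup_ofList l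
    obtain ⟨s1, s2, hsplit⟩ := List.append_of_mem hv
    rw [hsplit] at hnd
    rw [List.nodup_append] at hnd
    have hvs1 : v ∉ s1 := fun hmem => hnd.2.2 v hmem v (by simp) rfl
    have hvs2 : v ∉ s2 := by
      have := hnd.2.1
      simp only [List.nodup_cons] at this
      exact this.1
    rw [hsplit, List.map_append, List.map_cons, List.prod_append, List.prod_cons,
        List.map_append, List.map_cons, List.prod_append, List.prod_cons]
    have hm1 : s1.map (cycDiv (l ++ [v])) = s1.map (cycDiv l) := by
      apply List.map_congr_left
      intro u hu
      rw [cycDiv, cycDiv, hcu u (fun he => hvs1 (he ▸ hu))]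
    have hm2 : s2.map (cycDiv (l ++ [v])) = s2.map (cycDiv l) := by
      apply List.map_congr_left
      intro u hu
      rw [cycDiv, cycDiv, hcu u (fun he => hvs2 (he ▸ hu))]
    rw [hm1, hm2, hstep]
    ring
  · have hadd : PySem.Set.add (PySem.Set.ofList l) v = PySem.Set.ofList l ++ [v] := by
      unfold PySem.Set.add
      rw [if_neg (fun hc => hv ((PySem.Set.contains_iff _ _).mp hc))]
    have hvl : v ∉ l := fun hmem => hv ((PySem.Set.mem_ofList l v).mpr hmem)
    have hc0 : l.count v = 0 := List.count_eq_zero.mpr hvl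
    rw [hofl, hadd, List.map_append, List.map_cons, List.map_nil, List.prod_append,
        List.prod_cons, List.prod_nil]
    have hm1 : (PySem.Set.ofList l).map (cycDiv (l ++ [v])) = (PySem.Set.ofList l).map (cycDiv l) := by
      apply List.map_congr_left
      intro u hu
      have hul : u ∈ l := (PySem.Set.mem_ofList l u).mp hu
      rw [cycDiv, cycDiv, hcu u (fun he => hvl (he ▸ hul))]
    rw [hm1, hstep, cycDiv, hc0]
    simp [Nat.factorial]

lemma regroup (p : List Int) :
    (PySem.List.enumerate p).foldl (fun den iv =>
      den * (iv.2 * ((PySem.List.slice p none (some (iv.1 + 1))).count iv.2 : Int))) 1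
    = ((PySem.Set.ofList p).map (cycDiv p)).prod := by
  induction p using List.reverseRecOn with
  | nil => simp [PySem.List.enumerate_nil, PySem.Set.ofList_eq_foldl]
  | append_singleton l v ih =>
    rw [show PySem.List.enumerate (l ++ [v]) = PySem.List.enumerate (l ++ [v]) 0 from rfl,
        PySem.List.enumerate_append, List.foldl_append]
    have hsingle : PySem.List.enumerate [v] (0 + (l.length : Int)) = [((l.length : Int), v)] := by
      rw [PySem.List.enumerate_cons, PySem.List.enumerate_nil]
      norm_num
    rw [hsingle]
    have hinner : (PySem.List.enumerate l 0).foldl (fun den iv =>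
        den * (iv.2 * ((PySem.List.slice (l ++ [v]) none (some (iv.1 + 1))).count iv.2 : Int))) 1
        = (PySem.List.enumerate l 0).foldl (fun den iv =>
        den * (iv.2 * ((PySem.List.slice l none (some (iv.1 + 1))).count iv.2 : Int))) 1 := by
      apply PySem.List.foldl_congr_mem
      intro acc iv hiv
      obtain ⟨k, hk, rfl⟩ := (PySem.List.mem_enumerate_iff _ _ _).mp hiv
      have he : ((0:Int) + (k:Int)) + 1 = ((k+1 : Nat) : Int) := by push_cast; ring
      rw [he, PySem.List.slice_to_natCast, PySem.List.slice_to_natCast]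
      rw [List.take_append]
      have : k + 1 - l.length = 0 := by omega
      rw [this, List.take_zero, List.append_nil]
    rw [hinner, ih]
    simp only [List.foldl_cons, List.foldl_nil]
    have he2 : (l.length : Int) + 1 = (((l.length + 1) : Nat) : Int) := by push_cast; ring
    rw [he2, PySem.List.slice_to_natCast, List.take_of_length_le (by simp), prod_ofList_append]
    have hcnt : (l ++ [v]).count v = l.count v + 1 := by simp
    rw [hcnt]
    push_cast
    ring
lemma cycleIndex_eq (N n : Int) (p : List Int) (hN : 0 ≤ N) (hn0 : 0 ≤ n) (hnN : n ≤ N)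
    (hp : ∀ v ∈ p, 1 ≤ v) (hlen : (p.length : Int) ≤ N) :
    getCycleIndex p n (getFactorialTable N) = cycleIndexB n p := by
  have hlenN : p.length ≤ N.toNat := by omega
  rw [getCycleIndex]
  simp only [cycleIndexB]
  rw [PySem.Dict.items_counter, List.foldl_map]
  have hcongr : (PySem.Set.ofList p).foldl
      (fun ci v => PySem.Int.floordiv ci ((v ^ ((p.count v : Int)).toNat)
        * factorialA (p.count v : Int) (getFactorialTable N))) (factorialA n (getFactorialTable N))
      = (PySem.Set.ofList p).foldl
      (fun ci v => PySem.Int.floordiv ci (cycDiv p v)) (factorialA n (getFactorialTable N)) := by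
    apply PySem.List.foldl_congr_mem
    intro acc v hv
    have hvp : v ∈ p := (PySem.Set.mem_ofList p v).mp hv
    have hc1 : 1 ≤ p.count v := List.count_pos_iff.mpr hvp
    have hcN : p.count v ≤ p.length := List.count_le_length
    congr 1
    rw [cycDiv, factorialA_eq N hN (p.count v : Int) (by omega) (by omega)]
    simp
  have hdiv : ∀ d ∈ (PySem.Set.ofList p).map (cycDiv p), 1 ≤ d := by
    intro d hd
    obtain ⟨v, hv, rfl⟩ := List.mem_map.mp hd
    have hvp : v ∈ p := (PySem.Set.mem_ofList p v).mp hv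
    have hv1 : 1 ≤ v := hp v hvp
    rw [cycDiv]
    have h1 : (1:Int) ≤ v ^ p.count v := one_le_pow₀ hv1
    have h2 : (1:Int) ≤ (Nat.factorial (p.count v) : Int) := by
      have := Nat.factorial_pos (p.count v); omega
    nlinarith
  rw [hcongr, ← List.foldl_map (f := cycDiv p) (g := fun acc d => PySem.Int.floordiv acc d),
      factorialA_eq N hN n hn0 hnN]
  rw [foldl_floordiv _ _ (by positivity) hdiv, regroup p, factB_eq n hn0]

-- ---------- assembling the two solutions ----------
lemma mem_le_sum (l : List Int) (h : ∀ v ∈ l, 1 ≤ v) : ∀ v ∈ l, v ≤ l.sum := by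
  induction l with
  | nil => simp
  | cons x xs ih =>
    intro v hv
    have hxs : (0:Int) ≤ xs.sum := by
      have := length_le_sum xs (fun u hu => h u (by simp [hu]))
      omega
    rcases List.mem_cons.mp hv with rfl | hv
    · simp only [List.sum_cons]; omega
    · have h1 := ih (fun u hu => h u (by simp [hu])) v hv
      have hx := h x (by simp)
      simp only [List.sum_cons]; omega

lemma solution_eq (w h_ s : Int) (hw : 1 ≤ w) (hh : 1 ≤ h_) :
    solution w h_ s = solution_alt w h_ s := by
  have hN1 : 1 ≤ max w h_ := by omega
  set N := max w h_ with hNdef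
  have hWspec : partsB w.toNat w 1 = specParts w.toNat 1 :=
    partsB_eq_spec w.toNat w 1 (by omega) hw le_rfl
  have hHspec : partsB h_.toNat h_ 1 = specParts h_.toNat 1 :=
    partsB_eq_spec h_.toNat h_ 1 (by omega) hh le_rfl
  have hfacts : ∀ (t : Int), 1 ≤ t → t ≤ N → ∀ l ∈ specParts t.toNat 1,
      (∀ v ∈ l, 1 ≤ v ∧ v ≤ N) ∧ (l.length : Int) ≤ N := by
    intro t ht htN l hl
    have hcast : ((t.toNat : Nat) : Int) = t := by omega
    obtain ⟨hne, hge, hsum⟩ := specParts_mem t.toNat 1 le_rfl (by omega) l hl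
    rw [hcast] at hsum
    have hlen := length_le_sum l hge
    have hle := mem_le_sum l hge
    refine ⟨fun v hv => ⟨hge v hv, ?_⟩, by omega⟩
    have := hle v hv; omega
  have hexp : ∀ pw ph : List Int, (∀ v ∈ pw, 1 ≤ v ∧ v ≤ N) → (∀ v ∈ ph, 1 ≤ v ∧ v ≤ N) →
      (ph.map (fun j => (pw.map (fun i => gcdA i j (getGcdTable N))).sum)).sum
      = (ph.map (fun j => (pw.map (fun i => gcdB i j)).sum)).sum := by
    intro pw ph hw' hh'
    apply congrArg List.sum
    apply List.map_congr_left
    intro j hj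
    apply congrArg List.sum
    apply List.map_congr_left
    intro i hi
    rw [gcdA, getGcdTable_eq N hN1 i j (hw' i hi).1 (hw' i hi).2 (hh' j hj).1 (hh' j hj).2,
        gcdB_eq i j (by have := (hw' i hi).1; omega) (by have := (hh' j hj).1; omega)]
  simp only [solution, solution_alt]
  rw [getPartitionsA_eq_spec w hw, getPartitionsA_eq_spec h_ hh, ← hWspec, ← hHspec]
  congr 1
  congr 1
  · -- the accumulated sums agree
    apply PySem.List.foldl_congr_mem
    intro acc pw hpw
    rw [hWspec] at hpw
    obtain ⟨hpwv, hpwlen⟩ := hfacts w hw (by omega) pw hpw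
    apply PySem.List.foldl_congr_mem
    intro acc2 ph hph
    rw [hHspec] at hph
    obtain ⟨hphv, hphlen⟩ := hfacts h_ hh (by omega) ph hph
    rw [hexp pw ph hpwv hphv,
        cycleIndex_eq N w pw (by omega) (by omega) (by omega) (fun v hv => (hpwv v hv).1) hpwlen,
        cycleIndex_eq N h_ ph (by omega) (by omega) (by omega) (fun v hv => (hphv v hv).1) hphlen]
  · -- the denominators agree
    rw [factorialA_eq N (by omega) w (by omega) (by omega),
        factorialA_eq N (by omega) h_ (by omega) (by omega),
        factB_eq w (by omega), factB_eq h_ (by omega)]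

-- ===== VERDICT (by name: the statement is the Claim_ definition above) =====
theorem solution_spec : Claim_equal_solution := by
  intro w h_ s _ hpre
  exact solution_eq w h_ s hpre.1 hpre.2
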